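-- pv_equiv track=rewrite | github.com/gretel/lost | test_vectors/generate.py | compute_gray_demap
-- ===== SOURCE A (Python) =====
-- def compute_gray_demap(symbols, sf):
--     """Binary to Gray + offset by 1."""
--     N = 1 << sf
--     result = []
--     for s in symbols:
--         gray = s
--         shift = s
--         for _ in range(1, sf):
--             shift >>= 1
--             gray ^= shift
--         result.append((gray + 1) % N)
--     return result
-- ===== SOURCE B (Python) =====
-- def compute_gray_demap(symbols, sf):
--     """Binary to Gray + offset by 1 (logarithmic bit-folding Gray decode)."""
--     N = 1 << sf
--
--     def pref(s, m):
--         # XOR of s >> i for i in range(m), m >= 1, by binary doubling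
--         if m == 1:
--             return s
--         if m % 2 == 0:
--             t = pref(s, m // 2)
--             return t ^ (t >> (m // 2))
--         return pref(s, m - 1) ^ (s >> (m - 1))
--
--     m = sf if sf >= 1 else 1
--     return [(pref(s, m) + 1) % N for s in symbols]
-- ===== Notes on version B (the rewrite author's own statement) =====
-- stated objective: faster
-- what changed: A Gray-decodes each symbol with an (sf-1)-iteration shift/xor loop; B computes the same prefix-XOR of arithmetic shifts by binary doubling (t ^= t >> half), needing only O(log sf) shift/xor steps per symbol.
import Mathlib
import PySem

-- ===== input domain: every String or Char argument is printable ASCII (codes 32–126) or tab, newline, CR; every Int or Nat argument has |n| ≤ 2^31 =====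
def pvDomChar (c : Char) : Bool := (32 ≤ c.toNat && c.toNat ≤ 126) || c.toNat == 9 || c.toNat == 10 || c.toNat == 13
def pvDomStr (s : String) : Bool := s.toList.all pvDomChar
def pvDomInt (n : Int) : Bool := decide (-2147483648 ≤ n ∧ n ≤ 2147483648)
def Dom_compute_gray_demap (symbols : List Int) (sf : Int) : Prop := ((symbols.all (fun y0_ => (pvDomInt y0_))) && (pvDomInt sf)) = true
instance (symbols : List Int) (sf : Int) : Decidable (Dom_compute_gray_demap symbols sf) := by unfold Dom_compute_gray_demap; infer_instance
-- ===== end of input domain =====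

-- B replaces A's (sf-1)-step Gray-decode loop per symbol by logarithmic bit-folding
-- (binary doubling of the prefix-XOR of arithmetic shifts); objective: faster.

-- ===== PORT A =====
-- per symbol: gray = s; shift = s; for _ in range(1, sf): shift >>= 1; gray ^= shift
def compute_gray_demap (symbols : List Int) (sf : Int) : List Int :=
  let N : Int := 1 <<< sf.toNat
  symbols.foldl (fun result s =>
    let p := (PySem.List.pyRange 1 sf).foldl
      (fun (p : Int × Int) _ =>
        let shift := p.2 >>> (1 : Nat)
        (PySem.Int.bxor p.1 shift, shift)) (s, s)
    result ++ [PySem.Int.mod (p.1 + 1) N]) []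

-- ===== PORT B =====
-- pref s m = XOR of s >> i for i in range(m) (m ≥ 1), by binary doubling
def grayPref (s : Int) (m : Nat) : Int :=
  if m ≤ 1 then s
  else if m % 2 == 0 then
    let t := grayPref s (m / 2)
    PySem.Int.bxor t (t >>> (m / 2))
  else
    PySem.Int.bxor (grayPref s (m - 1)) (s >>> (m - 1))
termination_by m
decreasing_by all_goals omega

def compute_gray_demap_alt (symbols : List Int) (sf : Int) : List Int :=
  let N : Int := 1 <<< sf.toNat
  let m : Nat := if 1 ≤ sf then sf.toNat else 1
  symbols.map (fun s => PySem.Int.mod (grayPref s m + 1) N)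

-- ===== PRECONDITION & SPEC =====
-- Pre_ excludes sf < 0, on which Python's `1 << sf` raises ValueError.
def Pre_compute_gray_demap (_symbols : List Int) (sf : Int) : Prop := 0 ≤ sf
instance (symbols : List Int) (sf : Int) : Decidable (Pre_compute_gray_demap symbols sf) := by unfold Pre_compute_gray_demap; infer_instance
def pvWitness_compute_gray_demap : List Int × Int := ([0, 1, 2, 3, -5], 2)

def Spec_compute_gray_demap (symbols : List Int) (sf : Int) (out : List Int) : Prop := out = compute_gray_demap_alt symbols sf
instance (symbols : List Int) (sf : Int) (out : List Int) : Decidable (Spec_compute_gray_demap symbols sf out) := by unfold Spec_compute_gray_demap; infer_instance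

-- ===== CLAIM (what is proved, stated in full; the proofs are below) =====
def Claim_equal_compute_gray_demap : Prop := ∀ (symbols : List Int) (sf : Int), Dom_compute_gray_demap symbols sf → Pre_compute_gray_demap symbols sf → Spec_compute_gray_demap symbols sf (compute_gray_demap symbols sf)

-- ===== LEMMAS AND PROOFS =====

-- constructor characterizations of PySem.Int.bxor
theorem bxor_natCast_negSucc (m k : Nat) : PySem.Int.bxor (m : Int) (Int.negSucc k) = Int.negSucc (m ^^^ k) := by
  simp [PySem.Int.bxor, Int.negSucc_eq]; omega

theorem bxor_negSucc_natCast (m k : Nat) : PySem.Int.bxor (Int.negSucc m) (k : Int) = Int.negSucc (m ^^^ k) := by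
  simp [PySem.Int.bxor, Int.negSucc_eq]; omega

theorem bxor_negSucc_negSucc (m k : Nat) : PySem.Int.bxor (Int.negSucc m) (Int.negSucc k) = ((m ^^^ k : Nat) : Int) := by
  simp [PySem.Int.bxor, Int.negSucc_eq]; omega

theorem shiftRight_negSucc (m n : Nat) : (Int.negSucc m) >>> n = Int.negSucc (m >>> n) := rfl
theorem shiftRight_natCast (m n : Nat) : ((m : Int)) >>> n = ((m >>> n : Nat) : Int) := rfl

theorem bxor_assoc (a b c : Int) :
    PySem.Int.bxor (PySem.Int.bxor a b) c = PySem.Int.bxor a (PySem.Int.bxor b c) := by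
  rcases a with m | m <;> rcases b with k | k <;> rcases c with j | j <;>
    simp [bxor_natCast_negSucc, bxor_negSucc_natCast, bxor_negSucc_negSucc, Nat.xor_assoc]

-- arithmetic right shift distributes over Python xor
theorem bxor_shiftRight (x y : Int) (n : Nat) :
    (PySem.Int.bxor x y) >>> n = PySem.Int.bxor (x >>> n) (y >>> n) := by
  rcases x with m | m <;> rcases y with k | k <;>
    simp only [Int.ofNat_eq_natCast, PySem.Int.bxor_natCast, bxor_natCast_negSucc,
      bxor_negSucc_natCast, bxor_negSucc_negSucc, shiftRight_natCast, shiftRight_negSucc,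
      Nat.shiftRight_xor_distrib]

-- the value both programs compute per symbol: XOR of s >>> i over i < m
def prefXor (s : Int) (m : Nat) : Int :=
  (List.range m).foldl (fun a (i : Nat) => PySem.Int.bxor a (s >>> i)) 0

theorem bxor_zero_left (a : Int) : PySem.Int.bxor 0 a = a := by
  rw [PySem.Int.bxor_comm]; exact PySem.Int.bxor_zero a

theorem prefXor_succ (s : Int) (m : Nat) :
    prefXor s (m + 1) = PySem.Int.bxor (prefXor s m) (s >>> m) := by
  simp only [prefXor, List.range_succ, List.foldl_append, List.foldl_cons, List.foldl_nil]

theorem prefXor_one (s : Int) : prefXor s 1 = s := by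
  simp only [prefXor, List.range_one, List.foldl_cons, List.foldl_nil, bxor_zero_left,
    Int.shiftRight_zero]

theorem prefXor_add (s : Int) (a b : Nat) :
    prefXor s (a + b) = PySem.Int.bxor (prefXor s a) (prefXor s b >>> a) := by
  induction b with
  | zero => simp [prefXor]
  | succ b ih =>
      rw [show a + (b + 1) = (a + b) + 1 by omega, prefXor_succ, ih, bxor_assoc,
          prefXor_succ, bxor_shiftRight, ← Int.shiftRight_add, Nat.add_comm a b]

-- B's doubling recursion computes prefXor
theorem grayPref_eq (s : Int) (m : Nat) (hm : 1 ≤ m) : grayPref s m = prefXor s m := by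
  induction m using Nat.strong_induction_on with
  | _ m ih =>
    rw [grayPref]
    by_cases h1 : m ≤ 1
    · have : m = 1 := by omega
      simp [this, prefXor_one]
    · simp only [if_neg h1]
      by_cases h2 : m % 2 == 0
      · simp only [if_pos h2]
        have he : m % 2 = 0 := by simpa using h2
        have hrec := ih (m / 2) (by omega) (by omega)
        rw [hrec, show m = m / 2 + m / 2 by omega, prefXor_add]
        simp [show (m / 2 + m / 2) / 2 = m / 2 by omega]
      · simp only [if_neg h2]
        have hrec := ih (m - 1) (by omega) (by omega)
        rw [hrec, show m = (m - 1) + 1 by omega, prefXor_succ]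
        simp [show m - 1 + 1 - 1 = m - 1 by omega]

-- A's inner loop ignores the loop variable: it is iteration of one step
def stepA (p : Int × Int) : Int × Int :=
  let shift := p.2 >>> (1 : Nat)
  (PySem.Int.bxor p.1 shift, shift)

theorem foldl_const {α β : Type} (f : α → α) (l : List β) (init : α) :
    l.foldl (fun a _ => f a) init = f^[l.length] init := by
  induction l generalizing init with
  | nil => rfl
  | cons x xs ih => simp [List.foldl_cons, ih, Function.iterate_succ_apply]

theorem stepA_iterate (s : Int) (k : Nat) :
    stepA^[k] (s, s) = (prefXor s (k + 1), s >>> k) := by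
  induction k with
  | zero => simp [prefXor_one]
  | succ k ih =>
      rw [Function.iterate_succ_apply', ih]
      simp only [stepA, ← Int.shiftRight_add, prefXor_succ]

theorem compute_gray_demap_spec' (symbols : List Int) (sf : Int) (hsf : 0 ≤ sf) :
    compute_gray_demap symbols sf = compute_gray_demap_alt symbols sf := by
  unfold compute_gray_demap compute_gray_demap_alt
  rw [PySem.List.foldl_append_singleton_eq_map]
  apply List.map_congr_left
  intro s _
  have hfold : (PySem.List.pyRange 1 sf).foldl
      (fun (p : Int × Int) _ =>
        let shift := p.2 >>> (1 : Nat)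
        (PySem.Int.bxor p.1 shift, shift)) (s, s)
      = stepA^[(PySem.List.pyRange 1 sf).length] (s, s) :=
    foldl_const stepA _ _
  rw [hfold, PySem.List.length_pyRange_one, stepA_iterate]
  have hm : (sf - 1).toNat + 1 = (if 1 ≤ sf then sf.toNat else 1) := by
    split_ifs with h <;> omega
  rw [hm, grayPref_eq]
  split_ifs with h <;> omega

-- ===== VERDICT (by name: the statement is the Claim_ definition above) =====
theorem compute_gray_demap_spec : Claim_equal_compute_gray_demap := by
  intro symbols sf _ hpre
  exact compute_gray_demap_spec' symbols sf hpre
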